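-- pv_equiv track=rewrite | github.com/SENERGY-Platform/ml-trainer | model_trainer/tasks/data/kafka/kafka.py | build_column_string
-- ===== SOURCE A (Python) =====
-- def build_column_string(access_path):
--     string = ""
--     access_paths = access_path.split('.')
--     for i, level in enumerate(access_paths):
--         string += level
--
--         if i < len(access_paths)-1:
--             string += ' STRUCT<'
--
--     string += " DOUBLE"
--
--     for _ in range(len(access_paths)-1):
--         string += ">"
--
--     return string
-- ===== SOURCE B (Python) =====
-- def build_column_string(access_path):
--     def nest(segments):
--         head, *rest = segments
--         if not rest:
--             return head + " DOUBLE"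
--         return head + " STRUCT<" + nest(rest) + ">"
--     return nest(access_path.split('.'))
-- ===== Notes on version B (the rewrite author's own statement) =====
-- stated objective: alternative
-- what changed: Replaces A's two separate accumulation loops (enumerate loop appending ' STRUCT<' separators, then a range loop appending the closing '>'s) with a single structural recursion over the segment list that builds each nested STRUCT level, opening and closing bracket together.
import Mathlib
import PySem

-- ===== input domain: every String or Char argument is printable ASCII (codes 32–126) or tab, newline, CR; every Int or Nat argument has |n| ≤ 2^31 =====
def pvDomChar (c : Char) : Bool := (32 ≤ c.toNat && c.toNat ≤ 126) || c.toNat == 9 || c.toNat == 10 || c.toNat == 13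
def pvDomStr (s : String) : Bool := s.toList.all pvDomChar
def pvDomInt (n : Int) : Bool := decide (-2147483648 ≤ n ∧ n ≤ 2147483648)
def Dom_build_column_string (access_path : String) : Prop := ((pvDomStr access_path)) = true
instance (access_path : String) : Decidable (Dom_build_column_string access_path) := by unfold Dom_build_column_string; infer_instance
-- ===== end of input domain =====

-- B replaces A's two accumulation loops (separator loop + closing-'>' loop) with one
-- structural recursion over the segment list that nests each STRUCT level directly.


-- ===== PORT A =====
def build_column_string (access_path : String) : String :=
  let string := ""
  -- access_path.split('.'): sep "." is nonempty, so split? is always some; getD totalizes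
  let access_paths := (PySem.Str.split? access_path ".").getD []
  let string := (PySem.List.enumerate access_paths).foldl
    (fun s il =>
      let s := s ++ il.2
      if il.1 < PySem.List.len access_paths - 1 then s ++ " STRUCT<" else s) string
  let string := string ++ " DOUBLE"
  let string := (PySem.List.pyRange 0 (PySem.List.len access_paths - 1) 1).foldl
    (fun s _ => s ++ ">") string
  string

-- ===== PORT B =====
-- B's helper nest(segments): head, *rest pattern; the [] case is unreachable
-- (split('.') always yields at least one segment; Python would raise there)
def bcsNest : List String → String
  | [] => " DOUBLE"
  | [head] => head ++ " DOUBLE"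
  | head :: rest => head ++ " STRUCT<" ++ bcsNest rest ++ ">"

def build_column_string_alt (access_path : String) : String :=
  bcsNest ((PySem.Str.split? access_path ".").getD [])

-- ===== PRECONDITION & SPEC =====
def Spec_build_column_string (access_path : String) (out : String) : Prop := out = build_column_string_alt access_path
instance (access_path : String) (out : String) : Decidable (Spec_build_column_string access_path out) := by unfold Spec_build_column_string; infer_instance

-- ===== CLAIM (what is proved, stated in full; the proofs are below) =====
def Claim_equal_build_column_string : Prop := ∀ (access_path : String), Dom_build_column_string access_path → Spec_build_column_string access_path (build_column_string access_path)

-- ===== LEMMAS AND PROOFS =====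

-- the intercalation A's first loop builds
def pvMid : List String → String
  | [] => ""
  | [x] => x
  | x :: rest => x ++ " STRUCT<" ++ pvMid rest

-- the run of '>' A's second loop appends
def pvGt : Nat → String
  | 0 => ""
  | n + 1 => pvGt n ++ ">"

lemma splitOn_go_ne_nil (fuel : Nat) : ∀ (sep l cur : List Char) (acc : List (List Char)),
    PySem.Chars.splitOn.go sep fuel l cur acc ≠ [] := by
  induction fuel with
  | zero => intro sep l cur acc; simp [PySem.Chars.splitOn.go]
  | succ n ih =>
    intro sep l cur acc
    cases l with
    | nil => simp [PySem.Chars.splitOn.go]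
    | cons c rest =>
      rw [PySem.Chars.splitOn.go]
      split
      · exact ih _ _ _ _
      · exact ih _ _ _ _

lemma split_ne_nil (s : String) : (PySem.Str.split? s ".").getD [] ≠ [] := by
  simp [PySem.Str.split?, PySem.Chars.split?, PySem.Chars.splitOn, List.isEmpty]
  exact splitOn_go_ne_nil _ _ _ _ _

lemma loop1_eq (N : Int) : ∀ (ss : List String), ss ≠ [] → ∀ (s : Int) (acc : String),
    s + ss.length = N →
    (PySem.List.enumerate ss s).foldl
      (fun st il => if il.1 < N - 1 then st ++ il.2 ++ " STRUCT<" else st ++ il.2) acc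
    = acc ++ pvMid ss := by
  intro ss
  induction ss with
  | nil => intro h; exact absurd rfl h
  | cons x rest ih =>
    intro _ s acc hs
    cases rest with
    | nil =>
      simp only [List.length_cons, List.length_nil] at hs
      have hnlt : ¬ (s < N - 1) := by omega
      simp [PySem.List.enumerate_cons, hnlt, pvMid]
    | cons y t =>
      simp only [List.length_cons] at hs
      have hlt : s < N - 1 := by push_cast at hs; omega
      rw [PySem.List.enumerate_cons, List.foldl_cons]
      simp only [hlt, if_pos]
      rw [ih (List.cons_ne_nil y t) (s + 1) (acc ++ x ++ " STRUCT<")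
        (by simp only [List.length_cons]; push_cast at hs ⊢; omega)]
      simp [pvMid, String.append_assoc]

lemma loop2_eq : ∀ (l : List Int) (acc : String),
    l.foldl (fun s _ => s ++ ">") acc = acc ++ pvGt l.length := by
  intro l
  induction l with
  | nil => intro acc; simp [pvGt]
  | cons a t ih =>
    intro acc
    simp only [List.foldl_cons, List.length_cons, ih]
    -- acc ++ ">" ++ pvGt t.length = acc ++ (pvGt t.length ++ ">") : '>'-runs commute past each other
    clear ih a
    induction t.length generalizing acc with
    | zero => simp [pvGt]
    | succ n ihn =>
      show acc ++ ">" ++ pvGt (n + 1) = acc ++ pvGt (n + 1 + 1)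
      rw [pvGt, pvGt, ← String.append_assoc, ← String.append_assoc, ihn]

lemma bcsNest_eq : ∀ (ss : List String), ss ≠ [] →
    bcsNest ss = pvMid ss ++ " DOUBLE" ++ pvGt (ss.length - 1) := by
  intro ss
  induction ss with
  | nil => intro h; exact absurd rfl h
  | cons x rest ih =>
    intro _
    cases rest with
    | nil => simp [bcsNest, pvMid, pvGt]
    | cons y t =>
      rw [bcsNest, ih (List.cons_ne_nil y t)]
      · simp only [List.length_cons, Nat.add_sub_cancel]
        simp [pvMid, pvGt, String.append_assoc]
      · simp

-- ===== VERDICT (by name: the statement is the Claim_ definition above) =====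
theorem build_column_string_spec : Claim_equal_build_column_string := by
  intro ap _
  unfold Spec_build_column_string
  simp only [build_column_string, build_column_string_alt]
  have hne0 := split_ne_nil ap
  generalize h : (PySem.Str.split? ap ".").getD [] = ss at hne0 ⊢
  have hne : ss ≠ [] := hne0
  have hlen : 1 ≤ ss.length := List.length_pos_of_ne_nil hne
  rw [loop1_eq (PySem.List.len ss) ss hne 0 ""
    (by simp only [PySem.List.len_eq]; omega)]
  rw [show PySem.List.len ss - 1 = ((ss.length - 1 : Nat) : Int) from by
    simp only [PySem.List.len_eq]; omega]
  rw [PySem.List.pyRange_zero_natCast, loop2_eq]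
  rw [bcsNest_eq ss hne]
  simp [String.empty_append]
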